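-- pv_equiv track=rewrite | github.com/beerwithstraw/NL35 | nl35_extractor/extractor/companies/oriental_insurance.py | _split_cy_py
-- ===== SOURCE A (Python) =====
-- from typing import List, Tuple
--
-- def _split_cy_py(table: list) -> Tuple[list, list]:
--     """Split a stacked table at the second 'Particulars' row."""
--     found_first = False
--     for i, row in enumerate(table):
--         if row and (row[0] or "").strip() == "Particulars":
--             if not found_first:
--                 found_first = True
--             else:
--                 return table[:i], table[i:]
--     return table, []
-- ===== SOURCE B (Python) =====
-- from typing import Tuple
--
-- def _split_cy_py(table: list) -> Tuple[list, list]: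
--     """Split a stacked table at the second 'Particulars' row."""
--     def _hit(row):
--         return bool(row) and (row[0] or "").strip() == "Particulars"
--
--     def _after(rows):
--         # one 'Particulars' row already consumed: cut at the next one
--         if not rows:
--             return rows, []
--         if _hit(rows[0]):
--             return [], rows
--         head, tail = _after(rows[1:])
--         return [rows[0]] + head, tail
--
--     def _before(rows):
--         # no 'Particulars' row seen yet
--         if not rows:
--             return rows, []
--         head, tail = (_after if _hit(rows[0]) else _before)(rows[1:])
--         return [rows[0]] + head, tail
--
--     return _before(table)
-- ===== Notes on version B (the rewrite author's own statement) =====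
-- stated objective: alternative
-- what changed: Replaces A's enumerate-with-flag scan that returns slice indices by two staged recursive functions (_before/_after) that build the prefix of the split directly, with no index arithmetic, no flag state and no slicing at a found index.
import Mathlib
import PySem

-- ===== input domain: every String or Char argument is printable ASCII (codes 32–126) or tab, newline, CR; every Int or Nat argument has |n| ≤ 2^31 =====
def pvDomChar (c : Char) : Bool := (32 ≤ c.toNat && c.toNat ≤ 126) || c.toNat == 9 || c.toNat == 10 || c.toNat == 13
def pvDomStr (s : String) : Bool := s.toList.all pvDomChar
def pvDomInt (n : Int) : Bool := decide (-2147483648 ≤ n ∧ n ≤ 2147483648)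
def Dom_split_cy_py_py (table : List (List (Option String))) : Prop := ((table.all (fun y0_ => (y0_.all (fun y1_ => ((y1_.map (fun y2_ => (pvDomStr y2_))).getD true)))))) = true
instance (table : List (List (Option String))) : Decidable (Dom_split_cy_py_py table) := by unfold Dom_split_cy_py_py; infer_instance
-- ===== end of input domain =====

-- B replaces A's enumerate-with-flag scan (slice at the found index) by two staged
-- recursive functions that build the prefix of the split directly, with no indices. (objective: alternative)


-- ===== PORT A =====
-- shared predicate: `row and (row[0] or "").strip() == "Particulars"`
-- (row[0] is only read when row is nonempty, as in Python's short-circuit `and`)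
def pvHit : List (Option String) → Bool
  | [] => false
  | c :: _ => PySem.Str.strip (c.getD "") == "Particulars"

-- the for-loop with its found_first flag; early return modelled as `some i`
def pvALoop : List (List (Option String)) → Int → Bool → Option Int
  | [], _, _ => none
  | r :: rs, i, found =>
    if pvHit r then
      if !found then pvALoop rs (i + 1) true
      else some i
    else pvALoop rs (i + 1) found

def split_cy_py_py (table : List (List (Option String))) : List (List (Option String)) × List (List (Option String)) :=
  match pvALoop table 0 false with
  | some i => (table.take i.toNat, table.drop i.toNat)  -- table[:i], table[i:]; exact since i ≥ 0
  | none => (table, [])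

-- ===== PORT B =====
-- `_after`: one 'Particulars' row already consumed; cut at the next one
def pvAfter : List (List (Option String)) → List (List (Option String)) × List (List (Option String))
  | [] => ([], [])
  | r :: rs =>
    if pvHit r then ([], r :: rs)
    else
      let p := pvAfter rs
      (r :: p.1, p.2)

-- `_before`: no 'Particulars' row seen yet
def pvBefore : List (List (Option String)) → List (List (Option String)) × List (List (Option String))
  | [] => ([], [])
  | r :: rs =>
    let p := if pvHit r then pvAfter rs else pvBefore rs
    (r :: p.1, p.2)

def split_cy_py_py_alt (table : List (List (Option String))) : List (List (Option String)) × List (List (Option String)) :=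
  pvBefore table

-- ===== PRECONDITION & SPEC =====
def Spec_split_cy_py_py (table : List (List (Option String))) (out : List (List (Option String)) × List (List (Option String))) : Prop := out = split_cy_py_py_alt table
instance (table : List (List (Option String))) (out : List (List (Option String)) × List (List (Option String))) : Decidable (Spec_split_cy_py_py table out) := by unfold Spec_split_cy_py_py; infer_instance

-- ===== CLAIM (what is proved, stated in full; the proofs are below) =====
def Claim_equal_split_cy_py_py : Prop := ∀ (table : List (List (Option String))), Dom_split_cy_py_py table → Spec_split_cy_py_py table (split_cy_py_py table)

-- ===== LEMMAS AND PROOFS =====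

theorem pvALoop_shift : ∀ (rs : List (List (Option String))) (i : Int) (f : Bool),
    pvALoop rs i f = (pvALoop rs 0 f).map (· + i) := by
  intro rs
  induction rs with
  | nil => intro i f; simp [pvALoop]
  | cons r rs ih =>
    intro i f
    by_cases h : pvHit r = true
    · cases f <;> simp [pvALoop, h, ih (i + 1), ih 1] <;>
        · cases pvALoop rs 0 true <;> simp <;> ring
    · simp [pvALoop, h, ih (i + 1), ih 1]
      cases pvALoop rs 0 f <;> simp <;> ring

theorem pvALoop_nonneg : ∀ (rs : List (List (Option String))) (f : Bool) (j : Int),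
    pvALoop rs 0 f = some j → 0 ≤ j := by
  intro rs
  induction rs with
  | nil => intro f j h; simp [pvALoop] at h
  | cons r rs ih =>
    intro f j h
    by_cases hh : pvHit r = true
    · cases f with
      | false =>
        simp [pvALoop, hh, pvALoop_shift rs 1 true] at h
        obtain ⟨j', hj', rfl⟩ := h
        have := ih true j' hj'; omega
      | true => simp [pvALoop, hh] at h; omega
    · simp [pvALoop, hh, pvALoop_shift rs 1 f] at h
      obtain ⟨j', hj', rfl⟩ := h
      have := ih f j' hj'; omega

-- B's `_after` computes A's split for flag = true
theorem pvAfter_eq : ∀ (rs : List (List (Option String))),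
    pvAfter rs = match pvALoop rs 0 true with
      | some j => (rs.take j.toNat, rs.drop j.toNat)
      | none => (rs, []) := by
  intro rs
  induction rs with
  | nil => simp [pvAfter, pvALoop]
  | cons r rs ih =>
    by_cases h : pvHit r = true
    · simp [pvAfter, pvALoop, h]
    · rw [show pvAfter (r :: rs) = (r :: (pvAfter rs).1, (pvAfter rs).2) by simp [pvAfter, h]]
      rw [show pvALoop (r :: rs) 0 true = pvALoop rs 1 true by simp [pvALoop, h]]
      rw [pvALoop_shift rs 1 true, ih]
      cases hc : pvALoop rs 0 true with
      | none => simp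
      | some j =>
        have hj := pvALoop_nonneg rs true j hc
        simp
        constructor
        · rw [show ((j + 1).toNat) = j.toNat + 1 by omega]; rfl
        · rw [show ((j + 1).toNat) = j.toNat + 1 by omega]; rfl

-- B's `_before` computes A's split for flag = false
theorem pvBefore_eq : ∀ (rs : List (List (Option String))),
    pvBefore rs = match pvALoop rs 0 false with
      | some j => (rs.take j.toNat, rs.drop j.toNat)
      | none => (rs, []) := by
  intro rs
  induction rs with
  | nil => simp [pvBefore, pvALoop]
  | cons r rs ih =>
    by_cases h : pvHit r = true
    · rw [show pvBefore (r :: rs) = (r :: (pvAfter rs).1, (pvAfter rs).2) by simp [pvBefore, h]]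
      rw [show pvALoop (r :: rs) 0 false = pvALoop rs 1 true by simp [pvALoop, h]]
      rw [pvALoop_shift rs 1 true, pvAfter_eq rs]
      cases hc : pvALoop rs 0 true with
      | none => simp
      | some j =>
        have hj := pvALoop_nonneg rs true j hc
        simp
        constructor
        · rw [show ((j + 1).toNat) = j.toNat + 1 by omega]; rfl
        · rw [show ((j + 1).toNat) = j.toNat + 1 by omega]; rfl
    · rw [show pvBefore (r :: rs) = (r :: (pvBefore rs).1, (pvBefore rs).2) by simp [pvBefore, h]]
      rw [show pvALoop (r :: rs) 0 false = pvALoop rs 1 false by simp [pvALoop, h]]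
      rw [pvALoop_shift rs 1 false, ih]
      cases hc : pvALoop rs 0 false with
      | none => simp
      | some j =>
        have hj := pvALoop_nonneg rs false j hc
        simp
        constructor
        · rw [show ((j + 1).toNat) = j.toNat + 1 by omega]; rfl
        · rw [show ((j + 1).toNat) = j.toNat + 1 by omega]; rfl

-- ===== VERDICT (by name: the statement is the Claim_ definition above) =====
theorem split_cy_py_py_spec : Claim_equal_split_cy_py_py := by
  intro table _
  show split_cy_py_py table = split_cy_py_py_alt table
  unfold split_cy_py_py split_cy_py_py_alt
  rw [pvBefore_eq]
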